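-- pv_equiv track=rewrite | github.com/pypi-data/pypi-mirror-83 | packages/PyStratum-Common/PyStratum-Common-1.0.3.tar.gz/PyStratum-Common-1.0.3/pystratum_common/DocBlockReflection.py | __remove_leading_empty_lines
-- ===== SOURCE A (Python) =====
-- from typing import List, Tuple
--
-- def __remove_leading_empty_lines(lines: List[str]) -> List[str]:
--     """
--     Removes leading empty lines from a list of lines.
--
--     :param list[str] lines: The lines.
--     """
--     tmp = list()
--     empty = True
--     for i in range(0, len(lines)):
--         empty = empty and lines[i] == ''
--         if not empty:
--             tmp.append(lines[i])
--
--     return tmp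
-- ===== SOURCE B (Python) =====
-- from typing import List
--
-- def __remove_leading_empty_lines(lines: List[str]) -> List[str]:
--     """Removes leading empty lines from a list of lines."""
--     for line in lines:
--         if line != '':
--             # first non-empty value; its first occurrence is the cutoff,
--             # since every earlier element is ''
--             return lines[lines.index(line):]
--     return []
-- ===== Notes on version B (the rewrite author's own statement) =====
-- stated objective: alternative
-- what changed: Replaces the flag-and-append accumulator loop by an early-return search for the first non-empty value followed by list.index and one slice of the original list, building no intermediate list element by element.
import Mathlib
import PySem

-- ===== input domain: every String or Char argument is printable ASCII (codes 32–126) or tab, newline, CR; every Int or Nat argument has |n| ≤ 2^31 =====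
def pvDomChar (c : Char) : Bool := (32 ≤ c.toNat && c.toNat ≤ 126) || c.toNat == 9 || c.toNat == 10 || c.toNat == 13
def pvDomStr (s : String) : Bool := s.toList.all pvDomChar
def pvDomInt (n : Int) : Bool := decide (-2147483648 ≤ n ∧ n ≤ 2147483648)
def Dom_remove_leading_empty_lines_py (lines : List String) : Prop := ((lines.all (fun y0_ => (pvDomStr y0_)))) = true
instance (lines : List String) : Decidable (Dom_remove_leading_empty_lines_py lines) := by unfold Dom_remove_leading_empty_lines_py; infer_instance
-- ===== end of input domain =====

-- B replaces A's flag-and-append accumulator loop by an early-return search for the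
-- first non-empty value plus list.index and one slice (objective: alternative).

-- ===== PORT A =====
-- Port of A: fold over the lines carrying (empty, tmp); the indexed
-- `for i in range(len(lines))` loop visits the list in order.
def pvStepA (st : Bool × List String) (x : String) : Bool × List String :=
  let empty := st.1 && (x == "")
  if !empty then (empty, st.2 ++ [x]) else (empty, st.2)

def remove_leading_empty_lines_py (lines : List String) : List String :=
  (lines.foldl pvStepA (true, [])).2

-- ===== PORT B =====
-- Port of B: `for line in lines: if line != '': return lines[lines.index(line):]; return []`.
-- The `none` branch of index? is unreachable (the scanned element is a member of `orig`);
-- Python's list.index would raise there.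
def pvFindB (orig : List String) : List String → List String
  | [] => []
  | x :: xs =>
    if x != "" then
      match PySem.List.index? orig x with
      | some i => PySem.List.slice orig (some (i : Int)) none
      | none => []
    else pvFindB orig xs

def remove_leading_empty_lines_py_alt (lines : List String) : List String :=
  pvFindB lines lines

-- ===== PRECONDITION & SPEC =====
def Spec_remove_leading_empty_lines_py (lines : List String) (out : List String) : Prop := out = remove_leading_empty_lines_py_alt lines
instance (lines : List String) (out : List String) : Decidable (Spec_remove_leading_empty_lines_py lines out) := by unfold Spec_remove_leading_empty_lines_py; infer_instance

-- ===== CLAIM =====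
def Claim_equal_remove_leading_empty_lines_py : Prop := ∀ (lines : List String), Dom_remove_leading_empty_lines_py lines → Spec_remove_leading_empty_lines_py lines (remove_leading_empty_lines_py lines)

-- ===== LEMMAS AND PROOFS =====
lemma stepA_false (acc : List String) (x : String) :
    pvStepA (false, acc) x = (false, acc ++ [x]) := by
  simp [pvStepA]

lemma foldl_false (lines : List String) (acc : List String) :
    (lines.foldl pvStepA (false, acc)).2 = acc ++ lines := by
  induction lines generalizing acc with
  | nil => simp
  | cons x xs ih =>
    rw [List.foldl_cons, stepA_false]
    simp [ih]

-- A computes dropWhile (· == "")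
lemma foldl_true (lines : List String) (acc : List String) :
    (lines.foldl pvStepA (true, acc)).2 = acc ++ lines.dropWhile (fun s => s == "") := by
  induction lines generalizing acc with
  | nil => simp
  | cons x xs ih =>
    by_cases h : x = ""
    · rw [List.foldl_cons, show pvStepA (true, acc) x = (true, acc) by simp [pvStepA, h]]
      simp [ih, List.dropWhile, h]
    · rw [List.foldl_cons, show pvStepA (true, acc) x = (false, acc ++ [x]) by simp [pvStepA, h]]
      have hx : (x == "") = false := by simp [h]
      simp [foldl_false, List.dropWhile, hx]

lemma dropWhile_all_empty (e rest : List String) (he : ∀ s ∈ e, s = "") :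
    (e ++ rest).dropWhile (fun s => s == "") = rest.dropWhile (fun s => s == "") := by
  induction e with
  | nil => simp
  | cons y ys ih =>
    have hy : y = "" := he y (by simp)
    simp [hy, ih (fun s hs => he s (by simp [hs]))]

-- B computes dropWhile (· == "") too
lemma pvFindB_dropWhile (rest e : List String) (he : ∀ s ∈ e, s = "") :
    pvFindB (e ++ rest) rest = (e ++ rest).dropWhile (fun s => s == "") := by
  induction rest generalizing e with
  | nil =>
    simp [pvFindB, List.dropWhile_eq_nil_iff]
    intro x hx; simp [he x hx]
  | cons x xs ih =>
    by_cases h : x = ""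
    · have : e ++ x :: xs = (e ++ [x]) ++ xs := by simp
      rw [this] at *
      have := ih (e ++ [x]) (by intro s hs; rcases List.mem_append.mp hs with h1 | h1
                                · exact he s h1
                                · simp at h1; simp [h1, h])
      simpa [pvFindB, h] using this
    · have hnotin : x ∉ e := fun hmem => h (he x hmem)
      have hidx : PySem.List.index? (e ++ x :: xs) x = some e.length := by
        have : e ++ x :: xs = (e ++ [x]) ++ xs := by simp
        rw [this, PySem.List.index?_append_of_mem _ (by simp)]
        exact PySem.List.index?_append_singleton_self e x hnotin
      have hx : (x == "") = false := by simp [h]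
      rw [dropWhile_all_empty e (x :: xs) he]
      have hidx' : List.idxOf? x (e ++ x :: xs) = some e.length := by
        simpa [PySem.List.index?_eq_idxOf?] using hidx
      simp [pvFindB, h, hidx', List.dropWhile, hx]

-- ===== VERDICT =====
theorem remove_leading_empty_lines_py_spec : Claim_equal_remove_leading_empty_lines_py := by
  intro lines _
  unfold Spec_remove_leading_empty_lines_py remove_leading_empty_lines_py remove_leading_empty_lines_py_alt
  rw [show lines = [] ++ lines from rfl] at *
  simpa using (foldl_true lines []).trans (pvFindB_dropWhile lines [] (by simp)).symm
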